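-- pv_equiv track=rewrite | github.com/LordBrom/programming-challenges | adventofcode/2018/day11.py | checkPowerLevels
-- ===== SOURCE A (Python) =====
-- def checkPowerLevels(powerLevels):
--     best = 0
--     bestPos = None
--     bestSize = None
--     for x in range(len(powerLevels)):
--         for y in range(len(powerLevels[x])):
--             powerSum = 0
--             for difX in range(-1, 2):
--                 for difY in range(-1, 2):
--                     checkX = x + difX
--                     checkY = y + difY
--                     if checkX < 0 or checkX >= len(powerLevels):
--                         continue
--                     if checkY < 0 or checkY >= len(powerLevels[x]):
--                         continue
--                     powerSum += powerLevels[checkX][checkY]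
--             if best < powerSum:
--                 best = powerSum
--                 bestPos = [x, y]
--     return (bestPos, best, bestSize)
-- ===== SOURCE B (Python) =====
-- def checkPowerLevels(powerLevels):
--     n = len(powerLevels)
--     m = len(powerLevels[0]) if n else 0
--     # summed-area table: P[i][j] = sum of cells with row < i and col < j
--     P = [[0] * (m + 1)]
--     for row in powerLevels:
--         prev = P[-1]
--         cur = [0]
--         for j in range(m):
--             cur.append(cur[-1] + prev[j + 1] - prev[j] + row[j])
--         P.append(cur)
--     best = 0
--     bestPos = None
--     for x in range(n):
--         for y in range(m):
--             x0 = max(0, x - 1)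
--             x1 = min(n, x + 2)
--             y0 = max(0, y - 1)
--             y1 = min(m, y + 2)
--             s = P[x1][y1] - P[x0][y1] - P[x1][y0] + P[x0][y0]
--             if best < s:
--                 best = s
--                 bestPos = [x, y]
--     return (bestPos, best, None)
-- ===== Notes on version B (the rewrite author's own statement) =====
-- stated objective: faster
-- what changed: B precomputes a 2D summed-area (prefix-sum) table once and obtains each 3x3 window sum from four corner lookups, replacing A's per-cell 3x3 double loop with its per-element bound clipping.
import Mathlib
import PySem

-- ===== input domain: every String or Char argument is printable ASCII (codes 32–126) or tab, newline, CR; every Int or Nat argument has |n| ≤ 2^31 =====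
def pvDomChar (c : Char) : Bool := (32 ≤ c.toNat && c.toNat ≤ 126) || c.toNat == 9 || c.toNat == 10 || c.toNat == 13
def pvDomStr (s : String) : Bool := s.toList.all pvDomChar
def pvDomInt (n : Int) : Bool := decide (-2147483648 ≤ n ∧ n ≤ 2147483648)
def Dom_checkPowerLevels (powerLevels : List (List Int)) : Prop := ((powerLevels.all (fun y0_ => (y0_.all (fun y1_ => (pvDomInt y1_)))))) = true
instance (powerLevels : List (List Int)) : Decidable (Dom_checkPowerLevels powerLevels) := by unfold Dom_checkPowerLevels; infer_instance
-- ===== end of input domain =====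

-- B replaces A's per-cell 3x3 double loop by a summed-area (2D prefix-sum) table with four corner
-- lookups per cell (objective: faster by a constant factor, measured).

-- ===== PORT A =====
def checkPowerLevels (powerLevels : List (List Int)) : Option (List Int) × Int × Option (List Int) :=
  let st :=
    (PySem.List.pyRange 0 (powerLevels.length : Int) 1).foldl (fun (st : Int × Option (List Int)) x =>
      (PySem.List.pyRange 0 (((PySem.List.pyGet? powerLevels x).getD []).length : Int) 1).foldl (fun st y =>
        let powerSum :=
          (PySem.List.pyRange (-1) 2 1).foldl (fun s difX =>
            (PySem.List.pyRange (-1) 2 1).foldl (fun s difY =>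
              let checkX := x + difX
              let checkY := y + difY
              if checkX < 0 ∨ (powerLevels.length : Int) ≤ checkX then s
              else if checkY < 0 ∨ (((PySem.List.pyGet? powerLevels x).getD []).length : Int) ≤ checkY then s
              else s + PySem.List.pyGetD ((PySem.List.pyGet? powerLevels checkX).getD []) checkY 0) s) 0
        if st.1 < powerSum then (powerSum, some [x, y]) else st) st)
      ((0 : Int), (none : Option (List Int)))
  (st.2, st.1, none)

-- ===== PORT B =====
def checkPowerLevels_alt (powerLevels : List (List Int)) : Option (List Int) × Int × Option (List Int) :=
  let n : Int := powerLevels.length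
  let m : Int := if powerLevels.length ≠ 0 then (((PySem.List.pyGet? powerLevels 0).getD []).length : Int) else 0
  let P : List (List Int) :=
    powerLevels.foldl (fun P row =>
      let prev := PySem.List.pyGetD P (-1) []
      let cur := (PySem.List.pyRange 0 m 1).foldl (fun cur j =>
        cur ++ [PySem.List.pyGetD cur (-1) 0 + PySem.List.pyGetD prev (j + 1) 0
                - PySem.List.pyGetD prev j 0 + PySem.List.pyGetD row j 0]) [0]
      P ++ [cur]) [List.replicate (m + 1).toNat 0]
  let st :=
    (PySem.List.pyRange 0 n 1).foldl (fun (st : Int × Option (List Int)) x =>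
      (PySem.List.pyRange 0 m 1).foldl (fun st y =>
        let x0 := max 0 (x - 1)
        let x1 := min n (x + 2)
        let y0 := max 0 (y - 1)
        let y1 := min m (y + 2)
        let s := PySem.List.pyGetD ((PySem.List.pyGet? P x1).getD []) y1 0
               - PySem.List.pyGetD ((PySem.List.pyGet? P x0).getD []) y1 0
               - PySem.List.pyGetD ((PySem.List.pyGet? P x1).getD []) y0 0
               + PySem.List.pyGetD ((PySem.List.pyGet? P x0).getD []) y0 0
        if st.1 < s then (s, some [x, y]) else st) st)
      ((0 : Int), (none : Option (List Int)))
  (st.2, st.1, none)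

-- ===== PRECONDITION & SPEC =====
-- Pre_ excludes exactly the non-rectangular grids: on every grid whose rows do not all have the
-- same length A raises IndexError (it clips the column index by the CURRENT row's length but
-- indexes a NEIGHBOUR row), so Pre_ admits precisely the inputs on which A returns.
def Pre_checkPowerLevels (powerLevels : List (List Int)) : Prop :=
  ∀ r ∈ powerLevels, r.length = (powerLevels.headD []).length
instance (powerLevels : List (List Int)) : Decidable (Pre_checkPowerLevels powerLevels) := by
  unfold Pre_checkPowerLevels; infer_instance

def pvWitness_checkPowerLevels : List (List Int) := [[1, 2], [3, 4]]

def Spec_checkPowerLevels (powerLevels : List (List Int)) (out : Option (List Int) × Int × Option (List Int)) : Prop := out = checkPowerLevels_alt powerLevels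
instance (powerLevels : List (List Int)) (out : Option (List Int) × Int × Option (List Int)) : Decidable (Spec_checkPowerLevels powerLevels out) := by unfold Spec_checkPowerLevels; infer_instance

-- ===== CLAIM (what is proved, stated in full; the proofs are below) =====
def Claim_equal_checkPowerLevels : Prop := ∀ (powerLevels : List (List Int)), Dom_checkPowerLevels powerLevels → Pre_checkPowerLevels powerLevels → Spec_checkPowerLevels powerLevels (checkPowerLevels powerLevels)

-- ===== LEMMAS AND PROOFS =====

lemma sum_take_succ (r : List Int) (k : Nat) :
    (r.take (k + 1)).sum = (r.take k).sum + r.getD k 0 := by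
  induction r generalizing k with
  | nil => simp [List.getD]
  | cons a t ih =>
    cases k with
    | zero => simp [List.getD]
    | succ k => simp [List.take_succ_cons, ih k]; ring

def cellS (pl : List (List Int)) (i j : Nat) : Int :=
  ((pl.take i).map (fun r => (r.take j).sum)).sum

lemma getD_range_map (f : Nat → Int) (n k : Nat) (h : k < n) (d : Int) :
    ((List.range n).map f).getD k d = f k := by
  simp [List.getD_eq_getElem?_getD, List.getElem?_range, h]

lemma window1 (q : List Int) (k : Nat) (hk : k < q.length) :
    (q.take (min q.length (k + 2))).sum - (q.take (k - 1)).sum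
      = (if k = 0 then 0 else q.getD (k - 1) 0) + q.getD k 0
        + (if k + 1 < q.length then q.getD (k + 1) 0 else 0) := by
  rcases Nat.eq_zero_or_pos k with hk0 | hk0
  · subst hk0
    by_cases h2 : 0 + 1 < q.length
    · rw [show min q.length (0 + 2) = 0 + 1 + 1 by omega, sum_take_succ, sum_take_succ,
        if_pos h2, if_pos rfl]
      simp
    · rw [show min q.length (0 + 2) = 0 + 1 by omega, sum_take_succ,
        if_neg h2, if_pos rfl]
      simp
  · obtain ⟨k', rfl⟩ : ∃ k', k = k' + 1 := ⟨k - 1, by omega⟩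
    rw [if_neg (by omega : ¬ k' + 1 = 0), show k' + 1 - 1 = k' from rfl]
    by_cases h2 : k' + 1 + 1 < q.length
    · rw [show min q.length (k' + 1 + 2) = k' + 1 + 1 + 1 by omega, sum_take_succ,
        sum_take_succ, sum_take_succ, if_pos h2]
      ring
    · rw [show min q.length (k' + 1 + 2) = k' + 1 + 1 by omega, sum_take_succ,
        sum_take_succ, if_neg h2]
      ring

lemma pyRange_m1_2 : PySem.List.pyRange (-1) 2 1 = [-1, 0, 1] := by decide

lemma Ainner (r : List Int) (mlen : Nat) (hr : r.length = mlen) (k : Nat) (hk : k < mlen) (s : Int) :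
    (PySem.List.pyRange (-1) 2 1).foldl (fun s difY =>
        if (k : Int) + difY < 0 ∨ (mlen : Int) ≤ (k : Int) + difY then s
        else s + PySem.List.pyGetD r ((k : Int) + difY) 0) s
      = s + ((r.take (min mlen (k + 2))).sum - (r.take (k - 1)).sum) := by
  have hwin := window1 r k (by omega)
  rw [hr] at hwin
  rw [hwin, pyRange_m1_2]
  simp only [List.foldl_cons, List.foldl_nil]
  rw [if_neg (by omega : ¬ ((k : Int) + 0 < 0 ∨ (mlen : Int) ≤ (k : Int) + 0))]
  rw [show (k : Int) + 0 = ((k : Nat) : Int) by ring, PySem.List.pyGetD_natCast]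
  rw [show (k : Int) + 1 = (((k + 1 : Nat)) : Int) by push_cast; ring, PySem.List.pyGetD_natCast]
  rcases Nat.eq_zero_or_pos k with hk0 | hk0
  · subst hk0
    rw [if_pos (by omega : ((0 : Nat) : Int) + -1 < 0 ∨ (mlen : Int) ≤ ((0 : Nat) : Int) + -1)]
    by_cases h2 : 0 + 1 < mlen
    · have hc : ¬ (((0 + 1 : Nat) : Int) < 0 ∨ (mlen : Int) ≤ ((0 + 1 : Nat) : Int)) := by
        omega
      rw [if_neg hc, if_pos h2, if_pos rfl]
      ring
    · have hc : (((0 + 1 : Nat) : Int) < 0 ∨ (mlen : Int) ≤ ((0 + 1 : Nat) : Int)) := by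
        omega
      rw [if_pos hc, if_neg h2, if_pos rfl]
      ring
  · obtain ⟨k', rfl⟩ : ∃ k', k = k' + 1 := ⟨k - 1, by omega⟩
    rw [if_neg (by omega : ¬ (((k' + 1 : Nat) : Int) + -1 < 0 ∨ (mlen : Int) ≤ ((k' + 1 : Nat) : Int) + -1))]
    rw [show ((k' + 1 : Nat) : Int) + -1 = ((k' : Nat) : Int) by push_cast; ring, PySem.List.pyGetD_natCast]
    rw [if_neg (by omega : ¬ k' + 1 = 0), show k' + 1 - 1 = k' from rfl]
    by_cases h2 : k' + 1 + 1 < mlen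
    · have hc : ¬ (((k' + 1 + 1 : Nat) : Int) < 0 ∨ (mlen : Int) ≤ ((k' + 1 + 1 : Nat) : Int)) := by
        omega
      rw [if_neg hc, if_pos h2]
      ring
    · have hc : (((k' + 1 + 1 : Nat) : Int) < 0 ∨ (mlen : Int) ≤ ((k' + 1 + 1 : Nat) : Int)) := by
        omega
      rw [if_pos hc, if_neg h2]
      ring

def rwin (mlen y : Nat) (r : List Int) : Int :=
  (r.take (min mlen (y + 2))).sum - (r.take (y - 1)).sum

def winsum (pl : List (List Int)) (xk yk : Nat) : Int :=
  ((pl.map (rwin (pl.headD []).length yk)).take (min pl.length (xk + 2))).sum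
    - ((pl.map (rwin (pl.headD []).length yk)).take (xk - 1)).sum

lemma inner_skip (c : Prop) [Decidable c] (hc : c) (body : Int → Int → Int) (l : List Int) (s : Int) :
    l.foldl (fun s d => if c then s else body s d) s = s := by
  induction l generalizing s with
  | nil => rfl
  | cons a t ih => simp [hc, ih]

lemma inner_noskip (c : Prop) [Decidable c] (hc : ¬ c) (body : Int → Int → Int) (l : List Int) (s : Int) :
    l.foldl (fun s d => if c then s else body s d) s = l.foldl body s := by
  induction l generalizing s with
  | nil => rfl
  | cons a t ih => simp [hc, ih]

lemma Frow (pl : List (List Int)) (hPre : ∀ r ∈ pl, r.length = (pl.headD []).length)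
    (c yk : Nat) (hc : c < pl.length) (hyk : yk < (pl.headD []).length) (s : Int) :
    (PySem.List.pyRange (-1) 2 1).foldl (fun s difY =>
        if (c : Int) < 0 ∨ (pl.length : Int) ≤ (c : Int) then s
        else if (yk : Int) + difY < 0 ∨ ((pl.headD []).length : Int) ≤ (yk : Int) + difY then s
        else s + PySem.List.pyGetD ((PySem.List.pyGet? pl (c : Int)).getD []) ((yk : Int) + difY) 0) s
      = s + rwin (pl.headD []).length yk (pl.getD c []) := by
  rw [inner_noskip _ (by omega)]
  rw [show (PySem.List.pyGet? pl (c : Int)).getD [] = pl.getD c [] by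
    simp [PySem.List.pyGet?_natCast, List.getD_eq_getElem?_getD]]
  have hget : pl.getD c [] = pl[c] := by
    simp [List.getD_eq_getElem?_getD, List.getElem?_eq_getElem hc]
  rw [hget]
  exact Ainner _ _ (hPre _ (List.getElem_mem hc)) yk hyk s

lemma getD_map_lt (f : List Int → Int) (pl : List (List Int)) (c : Nat) (hc : c < pl.length) :
    (pl.map f).getD c 0 = f (pl.getD c []) := by
  rw [List.getD_eq_getElem?_getD, List.getElem?_map, List.getElem?_eq_getElem hc]
  simp [List.getD_eq_getElem?_getD, List.getElem?_eq_getElem hc]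

lemma Acell (pl : List (List Int)) (hPre : ∀ r ∈ pl, r.length = (pl.headD []).length)
    (xk yk : Nat) (hx : xk < pl.length) (hy : yk < (pl.headD []).length) :
    (PySem.List.pyRange (-1) 2 1).foldl (fun s difX =>
      (PySem.List.pyRange (-1) 2 1).foldl (fun s difY =>
        if (xk : Int) + difX < 0 ∨ (pl.length : Int) ≤ (xk : Int) + difX then s
        else if (yk : Int) + difY < 0 ∨ ((pl.headD []).length : Int) ≤ (yk : Int) + difY then s
        else s + PySem.List.pyGetD ((PySem.List.pyGet? pl ((xk : Int) + difX)).getD []) ((yk : Int) + difY) 0) s) 0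
    = winsum pl xk yk := by
  unfold winsum
  rw [show min pl.length (xk + 2) = min (pl.map (rwin ((pl.headD []).length) yk)).length (xk + 2) by simp]
  rw [window1 _ xk (by simpa using hx)]
  have hexp : ∀ (g : Int → Int → Int) (s : Int),
      (PySem.List.pyRange (-1) 2 1).foldl g s = g (g (g s (-1)) 0) 1 := by
    intro g s; rw [pyRange_m1_2]; rfl
  rw [hexp]
  rcases Nat.eq_zero_or_pos xk with h0 | h0
  · subst h0
    rw [inner_skip _ (by omega : ((0 : Nat) : Int) + -1 < 0 ∨ (pl.length : Int) ≤ ((0 : Nat) : Int) + -1)]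
    simp only [show ((0 : Nat) : Int) + 0 = ((0 : Nat) : Int) by omega,
      show ((0 : Nat) : Int) + 1 = ((0 + 1 : Nat) : Int) by omega]
    rw [Frow pl hPre 0 yk (by omega) hy]
    by_cases h2 : 0 + 1 < pl.length
    · rw [Frow pl hPre (0 + 1) yk h2 hy]
      simp only [if_true, List.length_map]
      rw [if_pos h2, getD_map_lt _ _ _ (by omega : 0 < pl.length), getD_map_lt _ _ _ h2]
    · rw [inner_skip _ (by omega : ((0 + 1 : Nat) : Int) < 0 ∨ (pl.length : Int) ≤ ((0 + 1 : Nat) : Int))]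
      simp only [if_true, List.length_map]
      rw [if_neg h2, getD_map_lt _ _ _ (by omega : 0 < pl.length)]
      ring
  · obtain ⟨x', rfl⟩ : ∃ x', xk = x' + 1 := ⟨xk - 1, by omega⟩
    simp only [show ((x' + 1 : Nat) : Int) + -1 = ((x' : Nat) : Int) by omega,
      show ((x' + 1 : Nat) : Int) + 0 = ((x' + 1 : Nat) : Int) by omega,
      show ((x' + 1 : Nat) : Int) + 1 = ((x' + 1 + 1 : Nat) : Int) by omega]
    rw [Frow pl hPre x' yk (by omega) hy, Frow pl hPre (x' + 1) yk hx hy]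
    rw [if_neg (by omega : ¬ x' + 1 = 0), show x' + 1 - 1 = x' from rfl]
    by_cases h2 : x' + 1 + 1 < pl.length
    · rw [Frow pl hPre (x' + 1 + 1) yk h2 hy]
      simp only [List.length_map]
      rw [if_pos h2, getD_map_lt _ _ _ (by omega : x' < pl.length), getD_map_lt _ _ _ hx, getD_map_lt _ _ _ h2]
      ring
    · rw [inner_skip _ (by omega : ((x' + 1 + 1 : Nat) : Int) < 0 ∨ (pl.length : Int) ≤ ((x' + 1 + 1 : Nat) : Int))]
      simp only [List.length_map]
      rw [if_neg h2, getD_map_lt _ _ _ (by omega : x' < pl.length), getD_map_lt _ _ _ hx]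
      ring

def prow (pl : List (List Int)) (i : Nat) : List Int :=
  (List.range ((pl.headD []).length + 1)).map (fun j => cellS pl i j)

lemma cellS_zero (pl : List (List Int)) (i : Nat) : cellS pl i 0 = 0 := by
  simp [cellS]

lemma cellS_succ (pl : List (List Int)) (i j : Nat) (hi : i < pl.length) :
    cellS pl (i + 1) j = cellS pl i j + ((pl.getD i []).take j).sum := by
  have hget : pl.getD i [] = pl[i] := by
    simp [List.getD_eq_getElem?_getD, List.getElem?_eq_getElem hi]
  unfold cellS
  rw [List.map_take, List.map_take, sum_take_succ, getD_map_lt _ _ _ hi, hget]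

lemma innerRow (mlen : Nat) (f : Nat → Int) (hf0 : f 0 = 0) (row : List Int) :
    (PySem.List.pyRange 0 (mlen : Int) 1).foldl (fun cur j =>
        cur ++ [PySem.List.pyGetD cur (-1) 0 + PySem.List.pyGetD ((List.range (mlen + 1)).map f) (j + 1) 0
                - PySem.List.pyGetD ((List.range (mlen + 1)).map f) j 0 + PySem.List.pyGetD row j 0]) [0]
      = (List.range (mlen + 1)).map (fun j => f j + (row.take j).sum) := by
  suffices h : ∀ t, t ≤ mlen →
      (PySem.List.pyRange 0 (t : Int) 1).foldl (fun cur j =>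
        cur ++ [PySem.List.pyGetD cur (-1) 0 + PySem.List.pyGetD ((List.range (mlen + 1)).map f) (j + 1) 0
                - PySem.List.pyGetD ((List.range (mlen + 1)).map f) j 0 + PySem.List.pyGetD row j 0]) [0]
      = (List.range (t + 1)).map (fun j => f j + (row.take j).sum) by
    exact h mlen le_rfl
  intro t ht
  induction t with
  | zero =>
    rw [PySem.List.pyRange_one_eq_nil (by omega)]
    simp [hf0]
  | succ t ih =>
    rw [show ((t + 1 : Nat) : Int) = (t : Int) + 1 by push_cast; ring,
      PySem.List.pyRange_one_succ_right (by omega), List.foldl_append, ih (by omega)]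
    simp only [List.foldl_cons, List.foldl_nil]
    rw [show (List.range (t + 1)).map (fun j => f j + (row.take j).sum)
        = (List.range t).map (fun j => f j + (row.take j).sum) ++ [f t + (row.take t).sum] by
      rw [List.range_succ, List.map_append]; rfl]
    rw [PySem.List.pyGetD_neg_one_append_singleton]
    rw [show ((t : Nat) : Int) + 1 = ((t + 1 : Nat) : Int) by push_cast; ring]
    rw [PySem.List.pyGetD_natCast, PySem.List.pyGetD_natCast, PySem.List.pyGetD_natCast]
    rw [getD_range_map _ _ _ (by omega), getD_range_map _ _ _ (by omega)]
    have hval : f t + (row.take t).sum + f (t + 1) - f t + row.getD t 0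
        = f (t + 1) + (row.take (t + 1)).sum := by
      rw [sum_take_succ]; ring
    rw [hval]
    rw [show List.range (t + 1 + 1) = List.range (t + 1) ++ [t + 1] from List.range_succ,
      List.map_append,
      show List.range (t + 1) = List.range t ++ [t] from List.range_succ, List.map_append]
    simp [List.append_assoc]

lemma Pchar_aux (pl : List (List Int)) :
    ∀ (rows : List (List Int)) (i : Nat), i + rows.length = pl.length → rows = pl.drop i →
    rows.foldl (fun P row =>
        P ++ [(PySem.List.pyRange 0 (((pl.headD []).length : Nat) : Int) 1).foldl (fun cur j =>
          cur ++ [PySem.List.pyGetD cur (-1) 0 + PySem.List.pyGetD (PySem.List.pyGetD P (-1) []) (j + 1) 0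
                  - PySem.List.pyGetD (PySem.List.pyGetD P (-1) []) j 0 + PySem.List.pyGetD row j 0]) [0]])
      ((List.range (i + 1)).map (prow pl))
    = (List.range (pl.length + 1)).map (prow pl) := by
  intro rows
  induction rows with
  | nil =>
    intro i hlen _
    simp only [List.foldl_nil]
    have : i = pl.length := by simpa using hlen
    rw [this]
  | cons r rest ih =>
    intro i hlen hdrop
    have hlen' : i + (rest.length + 1) = pl.length := by simpa using hlen
    have hi : i < pl.length := by omega
    have hri : pl[i]? = some r := by
      have h0 : (pl.drop i)[0]? = some r := by rw [← hdrop]; rfl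
      rw [List.getElem?_drop] at h0; simpa using h0
    have hrmem : r ∈ pl := by
      have : r ∈ pl.drop i := by rw [← hdrop]; exact List.mem_cons_self ..
      exact List.mem_of_mem_drop this
    have hget : pl.getD i [] = r := by
      simp [List.getD_eq_getElem?_getD, hri]
    simp only [List.foldl_cons]
    have hprev : PySem.List.pyGetD ((List.range (i + 1)).map (prow pl)) (-1) []
        = prow pl i := by
      rw [show List.range (i + 1) = List.range i ++ [i] from List.range_succ, List.map_append]
      exact PySem.List.pyGetD_neg_one_append_singleton ..
    rw [hprev, show prow pl i = (List.range ((pl.headD []).length + 1)).map (fun j => cellS pl i j) from rfl]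
    rw [innerRow ((pl.headD []).length) (fun j => cellS pl i j) (cellS_zero pl i) r]
    have hrow2 : (List.range ((pl.headD []).length + 1)).map (fun j => cellS pl i j + (r.take j).sum)
        = prow pl (i + 1) := by
      unfold prow
      refine List.map_congr_left ?_
      intro j _
      rw [cellS_succ pl i j hi, hget]
    rw [hrow2]
    have hacc : (List.range (i + 1)).map (prow pl) ++ [prow pl (i + 1)]
        = (List.range (i + 1 + 1)).map (prow pl) := by
      rw [show List.range (i + 1 + 1) = List.range (i + 1) ++ [i + 1] from List.range_succ,
        List.map_append]; rfl
    rw [hacc]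
    exact ih (i + 1) (by simp at hlen ⊢; omega) (by
      have : pl.drop (i + 1) = (pl.drop i).drop 1 := by rw [List.drop_drop]
      rw [this, ← hdrop]; rfl)

lemma lookupP (pl : List (List Int)) (a b : Int) (ha0 : 0 ≤ a) (han : a ≤ (pl.length : Int))
    (hb0 : 0 ≤ b) (hbm : b ≤ ((pl.headD []).length : Int)) :
    PySem.List.pyGetD ((PySem.List.pyGet? ((List.range (pl.length + 1)).map (prow pl)) a).getD []) b 0
      = cellS pl a.toNat b.toNat := by
  obtain ⟨ak, rfl⟩ : ∃ k : Nat, a = (k : Int) := ⟨a.toNat, by omega⟩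
  obtain ⟨bk, rfl⟩ : ∃ k : Nat, b = (k : Int) := ⟨b.toNat, by omega⟩
  rw [PySem.List.pyGet?_natCast]
  have hak : ak < pl.length + 1 := by omega
  have h1 : ((List.range (pl.length + 1)).map (prow pl))[ak]? = some (prow pl ak) := by
    rw [List.getElem?_map, List.getElem?_range hak]; rfl
  rw [h1]
  simp only [Option.getD_some]
  rw [PySem.List.pyGetD_natCast]
  unfold prow
  rw [getD_range_map _ _ _ (by omega)]
  simp

lemma sum_take_map_sub (pl : List (List Int)) (f g : List Int → Int) (k : Nat) :
    ((pl.map (fun r => f r - g r)).take k).sum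
      = ((pl.map f).take k).sum - ((pl.map g).take k).sum := by
  induction pl generalizing k with
  | nil => simp
  | cons r t ih =>
    cases k with
    | zero => simp
    | succ k => simp [List.take_succ_cons, ih k]; ring

lemma Bcell (pl : List (List Int)) (xk yk : Nat) :
    cellS pl (min pl.length (xk + 2)) (min ((pl.headD []).length) (yk + 2))
      - cellS pl (xk - 1) (min ((pl.headD []).length) (yk + 2))
      - cellS pl (min pl.length (xk + 2)) (yk - 1)
      + cellS pl (xk - 1) (yk - 1)
    = winsum pl xk yk := by
  unfold winsum
  rw [show rwin ((pl.headD []).length) yk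
      = (fun r => (r.take (min ((pl.headD []).length) (yk + 2))).sum - (r.take (yk - 1)).sum) from rfl]
  rw [sum_take_map_sub, sum_take_map_sub]
  unfold cellS
  rw [List.map_take, List.map_take, List.map_take, List.map_take]
  ring

lemma AB_eq (pl : List (List Int)) (hPre : ∀ r ∈ pl, r.length = (pl.headD []).length) :
    checkPowerLevels pl = checkPowerLevels_alt pl := by
  by_cases hpl : pl = []
  · subst hpl; rfl
  · have hne : pl.length ≠ 0 := by simpa [List.length_eq_zero_iff] using hpl
    simp only [checkPowerLevels, checkPowerLevels_alt]
    have hm : (if pl.length ≠ 0 then (((PySem.List.pyGet? pl 0).getD []).length : Int) else 0)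
        = (((pl.headD []).length : Nat) : Int) := by
      rw [if_pos hne]
      rcases pl with _ | ⟨r, t⟩
      · exact absurd rfl hpl
      · simp [PySem.List.pyGet?_zero_cons]
    simp only [hm]
    have hrep : [List.replicate ((((pl.headD []).length : Nat) : Int) + 1).toNat (0 : Int)]
        = (List.range (0 + 1)).map (prow pl) := by
      have h1 : ((((pl.headD []).length : Nat) : Int) + 1).toNat = (pl.headD []).length + 1 := by
        omega
      rw [h1]
      have h2 : prow pl 0 = List.replicate ((pl.headD []).length + 1) 0 := by
        unfold prow
        rw [show (fun j => cellS pl 0 j) = (fun _ : Nat => (0 : Int)) from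
          funext (fun j => by simp [cellS])]
        rw [List.map_const', List.length_range]
      simp [h2]
    rw [hrep, Pchar_aux pl pl 0 (by simp) (by simp)]
    apply congrArg (fun st : Int × Option (List Int) => (st.2, st.1, (none : Option (List Int))))
    apply PySem.List.foldl_congr_mem
    intro acc x hx
    rw [PySem.List.mem_pyRange_one] at hx
    obtain ⟨xk, rfl⟩ : ∃ k : Nat, x = (k : Int) := ⟨x.toNat, by omega⟩
    have hxk : xk < pl.length := by omega
    have hrl : (PySem.List.pyGet? pl (xk : Int)).getD [] = pl[xk] := by
      rw [PySem.List.pyGet?_natCast, List.getElem?_eq_getElem hxk]; rfl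
    have hrlen : (pl[xk]).length = (pl.headD []).length := hPre _ (List.getElem_mem hxk)
    simp only [hrl, hrlen]
    apply PySem.List.foldl_congr_mem
    intro acc2 y hy
    rw [PySem.List.mem_pyRange_one] at hy
    obtain ⟨yk, rfl⟩ : ∃ k : Nat, y = (k : Int) := ⟨y.toNat, by omega⟩
    have hyk : yk < (pl.headD []).length := by omega
    rw [Acell pl hPre xk yk hxk hyk]
    simp only [show min ((pl.length : Int)) ((xk : Int) + 2) = ((min pl.length (xk + 2) : Nat) : Int) by omega,
      show max (0 : Int) ((xk : Int) - 1) = ((xk - 1 : Nat) : Int) by omega,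
      show min (((pl.headD []).length : Int)) ((yk : Int) + 2) = ((min ((pl.headD []).length) (yk + 2) : Nat) : Int) by omega,
      show max (0 : Int) ((yk : Int) - 1) = ((yk - 1 : Nat) : Int) by omega]
    rw [lookupP pl _ _ (by omega) (by omega) (by omega) (by omega),
      lookupP pl _ _ (by omega) (by omega) (by omega) (by omega),
      lookupP pl _ _ (by omega) (by omega) (by omega) (by omega),
      lookupP pl _ _ (by omega) (by omega) (by omega) (by omega)]
    simp only [Int.toNat_natCast]
    rw [Bcell pl xk yk]

-- ===== VERDICT (by name: the statement is the Claim_ definition above) =====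
theorem checkPowerLevels_spec : Claim_equal_checkPowerLevels := by
  intro pl _ hPre
  unfold Spec_checkPowerLevels
  exact AB_eq pl hPre
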